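-- pv_equiv track=rewrite | github.com/coder-weiru/CodeSignal | src/main/arcade/thecore/_08mirrorlake/ConstructSquare.py | solution
-- ===== SOURCE A (Python) =====
-- from typing import List
--
-- def solution(s):
--     ls = parse(s)
--     n = -1
--     for i in range(1, 100000):
--         sq = i ** 2
--         if len(str(sq)) == len(s):
--             ln = parse(str(sq))
--             if ls == ln and sq > n:
--                 n = sq
--         elif len(str(sq)) > len(s):
--             return n
--     return n
--
-- def parse(s):
--     m = dict()
--     for c in s:
--         if c in m.keys():
--             m[c] += 1
--         else:
--             m[c] = 1
--     l: List[int] = list(m.values())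
--     l.sort()
--     return l
-- ===== SOURCE B (Python) =====
-- from typing import List
--
-- # (lo, hi) = range of roots i whose square has exactly L decimal digits,
-- # intersected with A's scan range [1, 99999], for L = 1..10.
-- _BOUNDS = {1: (1, 3), 2: (4, 9), 3: (10, 31), 4: (32, 99), 5: (100, 316),
--            6: (317, 999), 7: (1000, 3162), 8: (3163, 9999),
--            9: (10000, 31622), 10: (31623, 99999)}
--
-- def solution(s):
--     ls = parse(s)
--     rng = _BOUNDS.get(len(s))
--     if rng is None:
--         return -1
--     lo, hi = rng
--     for i in range(hi, lo - 1, -1):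
--         sq = i * i
--         if parse(str(sq)) == ls:
--             return sq
--     return -1
--
-- def parse(s):
--     m = dict()
--     for c in s:
--         if c in m.keys():
--             m[c] += 1
--         else:
--             m[c] = 1
--     l: List[int] = list(m.values())
--     l.sort()
--     return l
-- ===== Notes on version B (the rewrite author's own statement) =====
-- stated objective: faster
-- what changed: Replaces A's ascending scan of all 99999 roots (per-square digit-length test plus running-max tracking) with a precomputed digit-boundary table giving the exact root range [lo,hi] for each string length, scanned descending with first-match early return.
import Mathlib
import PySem

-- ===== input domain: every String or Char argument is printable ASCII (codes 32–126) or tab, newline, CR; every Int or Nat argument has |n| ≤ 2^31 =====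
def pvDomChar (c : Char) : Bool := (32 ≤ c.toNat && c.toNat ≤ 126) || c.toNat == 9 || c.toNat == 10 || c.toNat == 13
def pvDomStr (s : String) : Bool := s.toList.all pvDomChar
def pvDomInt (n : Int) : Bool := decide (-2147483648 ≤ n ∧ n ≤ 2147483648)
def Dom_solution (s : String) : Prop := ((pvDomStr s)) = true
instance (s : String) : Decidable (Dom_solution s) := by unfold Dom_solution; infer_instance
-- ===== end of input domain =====

-- B replaces A's ascending scan of all 99999 roots (with per-square length test and
-- running-max tracking) by a precomputed digit-boundary table giving the exact root
-- range for each string length, scanned descending with first-match early return.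

-- ===== PORT A =====
-- helper `parse` (identical in both Python sources): char-count dict, values, sorted
def pvParse (s : String) : List Int :=
  let m := s.toList.foldl
    (fun (m : PySem.Dict Char Int) c =>
      if m.contains c then m.insert c (m.getD c 0 + 1) else m.insert c 1)
    PySem.Dict.empty
  PySem.List.sorted m.values (fun x => x) false

-- the `for i in range(1, 100000)` loop of A, with its early `return n`
def pvALoop (L : Int) (ls : List Int) : List Int → Int → Int
  | [], n => n
  | i :: rest, n =>
    let sq := i ^ 2
    if PySem.Str.len (PySem.Int.toStr sq) = L then
      let ln := pvParse (PySem.Int.toStr sq)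
      pvALoop L ls rest (if ls = ln ∧ sq > n then sq else n)
    else if PySem.Str.len (PySem.Int.toStr sq) > L then n
    else pvALoop L ls rest n

def solution (s : String) : Int :=
  pvALoop (PySem.Str.len s) (pvParse s) (PySem.List.pyRange 1 100000 1) (-1)

-- ===== PORT B =====
-- _BOUNDS: root range whose squares have exactly L digits, within A's scan range
def pvBounds : PySem.Dict Int (Int × Int) :=
  PySem.Dict.ofList [(1, (1, 3)), (2, (4, 9)), (3, (10, 31)), (4, (32, 99)),
    (5, (100, 316)), (6, (317, 999)), (7, (1000, 3162)), (8, (3163, 9999)),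
    (9, (10000, 31622)), (10, (31623, 99999))]

-- the `for i in range(hi, lo - 1, -1)` loop of B, first match returns
def pvBLoop (ls : List Int) : List Int → Int
  | [] => -1
  | i :: rest =>
    let sq := i * i
    if pvParse (PySem.Int.toStr sq) = ls then sq else pvBLoop ls rest

def solution_alt (s : String) : Int :=
  let ls := pvParse s
  match pvBounds.get? (PySem.Str.len s) with
  | none => -1
  | some (lo, hi) => pvBLoop ls (PySem.List.pyRange hi (lo - 1) (-1))

-- ===== PRECONDITION & SPEC =====
def Spec_solution (s : String) (out : Int) : Prop := out = solution_alt s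
instance (s : String) (out : Int) : Decidable (Spec_solution s out) := by unfold Spec_solution; infer_instance

-- ===== CLAIM (what is proved, stated in full; the proofs are below) =====
def Claim_equal_solution : Prop := ∀ (s : String), Dom_solution s → Spec_solution s (solution s)

-- ===== LEMMAS AND PROOFS =====

-- A's inner update: the body of A's loop on an index whose square has the right length
def pvStep (ls : List Int) (n i : Int) : Int :=
  if ls = pvParse (PySem.Int.toStr (i ^ 2)) ∧ i ^ 2 > n then i ^ 2 else n

-- exact digit length of Nat.toDigitsCore (enough fuel, positive argument)
theorem pv_toDigitsCore_len (fuel : Nat) : ∀ (m : Nat) (acc : List Char), m < fuel → 0 < m →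
    (Nat.toDigitsCore 10 fuel m acc).length = Nat.log 10 m + 1 + acc.length := by
  induction fuel with
  | zero => intro m acc h _; omega
  | succ f ih =>
    intro m acc hm hp
    simp only [Nat.toDigitsCore]
    by_cases h0 : m / 10 = 0
    · have hlt : m < 10 := by omega
      rw [if_pos h0, Nat.log_eq_zero_iff.mpr (Or.inl hlt)]
      simp
      omega
    · rw [if_neg h0]
      have h10 : 10 ≤ m := by omega
      rw [ih (m / 10) _ (by omega) (by omega), Nat.log_div_base]
      have := Nat.log_pos (b := 10) (by norm_num) h10
      simp only [List.length_cons]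
      omega

theorem pv_len_toStr (a : Int) (h : 0 < a) :
    PySem.Str.len (PySem.Int.toStr a) = (Nat.log 10 a.toNat : Int) + 1 := by
  rw [PySem.Str.len_eq, PySem.Int.toList_toStr]
  have hneg : ¬ a < 0 := by omega
  simp only [PySem.Int.toChars, if_neg hneg, Nat.toDigits]
  rw [pv_toDigitsCore_len (a.toNat + 1) a.toNat [] (by omega) (by omega)]
  simp

theorem pv_len_sq_eq (i : Int) (e : Nat) (h1 : 1 ≤ i)
    (hlb : (10:Int) ^ e ≤ i ^ 2) (hub : i ^ 2 < 10 ^ (e + 1)) :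
    PySem.Str.len (PySem.Int.toStr (i ^ 2)) = (e : Int) + 1 := by
  have hpos : 0 < i ^ 2 := by positivity
  rw [pv_len_toStr _ hpos]
  have hc : ((i ^ 2).toNat : Int) = i ^ 2 := Int.toNat_of_nonneg hpos.le
  have hlb' : 10 ^ e ≤ (i ^ 2).toNat := by
    have : ((10 ^ e : Nat) : Int) ≤ ((i ^ 2).toNat : Int) := by push_cast; omega
    exact_mod_cast this
  have hub' : (i ^ 2).toNat < 10 ^ (e + 1) := by
    have : ((i ^ 2).toNat : Int) < ((10 ^ (e + 1) : Nat) : Int) := by push_cast; omega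
    exact_mod_cast this
  rw [Nat.log_eq_of_pow_le_of_lt_pow hlb' hub']

theorem pv_len_sq_le (i : Int) (e : Nat) (h1 : 1 ≤ i) (hub : i ^ 2 < 10 ^ e) :
    PySem.Str.len (PySem.Int.toStr (i ^ 2)) ≤ (e : Int) := by
  have hpos : 0 < i ^ 2 := by positivity
  rw [pv_len_toStr _ hpos]
  have hub' : (i ^ 2).toNat < 10 ^ e := by
    have : ((i ^ 2).toNat : Int) < ((10 ^ e : Nat) : Int) := by
      push_cast; omega
    exact_mod_cast this
  have := Nat.log_lt_of_lt_pow (by omega : (i ^ 2).toNat ≠ 0) hub'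
  omega

theorem pv_len_sq_gt (i : Int) (e : Nat) (h1 : 1 ≤ i) (hlb : (10:Int) ^ e ≤ i ^ 2) :
    (e : Int) < PySem.Str.len (PySem.Int.toStr (i ^ 2)) := by
  have hpos : 0 < i ^ 2 := by positivity
  rw [pv_len_toStr _ hpos]
  have hlb' : 10 ^ e ≤ (i ^ 2).toNat := by
    have : ((10 ^ e : Nat) : Int) ≤ ((i ^ 2).toNat : Int) := by push_cast; omega
    exact_mod_cast this
  have := (Nat.le_log_iff_pow_le (by norm_num) (by omega : (i ^ 2).toNat ≠ 0)).mpr hlb'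
  omega

-- prefix of the scan whose squares are too short: no branch fires
theorem pvALoop_skip (L : Int) (ls : List Int) (xs ys : List Int) (n : Int)
    (h : ∀ i ∈ xs, PySem.Str.len (PySem.Int.toStr (i ^ 2)) < L) :
    pvALoop L ls (xs ++ ys) n = pvALoop L ls ys n := by
  induction xs generalizing n with
  | nil => rfl
  | cons i xs ih =>
    have hi := h i (by simp)
    simp only [List.cons_append, pvALoop]
    rw [if_neg (by omega), if_neg (by omega)]
    exact ih n (fun j hj => h j (by simp [hj]))

-- middle of the scan, squares of the right length: the loop folds pvStep
theorem pvALoop_middle (L : Int) (ls : List Int) (xs ys : List Int) (n : Int)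
    (h : ∀ i ∈ xs, PySem.Str.len (PySem.Int.toStr (i ^ 2)) = L) :
    pvALoop L ls (xs ++ ys) n = pvALoop L ls ys (xs.foldl (pvStep ls) n) := by
  induction xs generalizing n with
  | nil => rfl
  | cons i xs ih =>
    have hi := h i (by simp)
    simp only [List.cons_append, pvALoop, List.foldl_cons]
    rw [if_pos hi]
    exact ih _ (fun j hj => h j (by simp [hj]))

-- first index whose square is too long: A returns
theorem pvALoop_stop (L : Int) (ls : List Int) (i : Int) (rest : List Int) (n : Int)
    (h : L < PySem.Str.len (PySem.Int.toStr (i ^ 2))) :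
    pvALoop L ls (i :: rest) n = n := by
  simp only [pvALoop]
  rw [if_neg (by omega), if_pos (by omega)]

theorem pvFold_cases (ls : List Int) (xs : List Int) (n : Int) :
    xs.foldl (pvStep ls) n = n ∨ ∃ j ∈ xs, xs.foldl (pvStep ls) n = j * j := by
  induction xs generalizing n with
  | nil => exact Or.inl rfl
  | cons i xs ih =>
    simp only [List.foldl_cons]
    rcases ih (pvStep ls n i) with h | ⟨j, hj, hja⟩
    · rw [h]
      unfold pvStep
      split_ifs with hc
      · exact Or.inr ⟨i, by simp, by ring⟩
      · exact Or.inl rfl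
    · exact Or.inr ⟨j, by simp [hj], hja⟩

-- running-max over an increasing block of squares = first match on the reversed block
theorem pvStep_eq (ls : List Int) (n i : Int) :
    pvStep ls n i = if ls = pvParse (PySem.Int.toStr (i * i)) ∧ i * i > n then i * i else n := by
  simp [pvStep, pow_two]

theorem pvFold_eq_bLoop (ls : List Int) (xs : List Int)
    (hpos : ∀ i ∈ xs, 1 ≤ i) (hinc : xs.Pairwise (· < ·)) :
    xs.foldl (pvStep ls) (-1) = pvBLoop ls xs.reverse := by
  induction xs using List.reverseRecOn with
  | nil => rfl
  | append_singleton xs x ih =>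
    rw [List.pairwise_append] at hinc
    have hxpos : (1:Int) ≤ x := hpos x (by simp)
    have hgt : xs.foldl (pvStep ls) (-1) < x * x := by
      rcases pvFold_cases ls xs (-1) with h | ⟨j, hj, hja⟩
      · rw [h]; nlinarith
      · have hjx : j < x := hinc.2.2 j hj x (by simp)
        have hjp : (1:Int) ≤ j := hpos j (by simp [hj])
        rw [hja]; nlinarith
    rw [List.foldl_append, List.reverse_append]
    simp only [List.foldl_cons, List.foldl_nil, List.reverse_singleton, List.singleton_append]
    simp only [pvBLoop]
    rw [pvStep_eq]
    by_cases hp : pvParse (PySem.Int.toStr (x * x)) = ls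
    · rw [if_pos ⟨hp.symm, hgt⟩, if_pos hp]
    · rw [if_neg (fun hc => hp hc.1.symm), if_neg hp]
      exact ih (fun i hi => hpos i (by simp [hi])) hinc.1

-- the generic shape: A's full scan equals B's descending scan of [lo, hi]
theorem pv_core (ls : List Int) (L lo hi : Int) (h1 : 1 ≤ lo) (h2 : lo ≤ hi) (h3 : hi ≤ 99999)
    (hbelow : ∀ i, 1 ≤ i → i < lo → PySem.Str.len (PySem.Int.toStr (i ^ 2)) < L)
    (hin : ∀ i, lo ≤ i → i ≤ hi → PySem.Str.len (PySem.Int.toStr (i ^ 2)) = L)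
    (habove : ∀ i, hi < i → i < 100000 → L < PySem.Str.len (PySem.Int.toStr (i ^ 2))) :
    pvALoop L ls (PySem.List.pyRange 1 100000 1) (-1) =
      pvBLoop ls (PySem.List.pyRange hi (lo - 1) (-1)) := by
  rw [PySem.List.pyRange_one_append 1 lo 100000 (by omega) (by omega),
      PySem.List.pyRange_one_append lo (hi + 1) 100000 (by omega) (by omega),
      pvALoop_skip _ _ _ _ _ (fun i hi => by
        rw [PySem.List.mem_pyRange_one] at hi
        exact hbelow i hi.1 hi.2),
      pvALoop_middle _ _ _ _ _ (fun i hi => by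
        rw [PySem.List.mem_pyRange_one] at hi
        exact hin i hi.1 (by omega)),
      PySem.List.pyRange_neg_one_eq_reverse,
      show lo - 1 + 1 = lo by ring,
      ← pvFold_eq_bLoop ls _ (fun i hi => by
          rw [PySem.List.mem_pyRange_one] at hi; omega)
        (PySem.List.pairwise_lt_pyRange_one lo (hi + 1))]
  by_cases hcap : hi + 1 < 100000
  · rw [PySem.List.pyRange_one_cons hcap,
        pvALoop_stop _ _ _ _ _ (habove (hi + 1) (by omega) (by omega))]
  · rw [PySem.List.pyRange_one_eq_nil (by omega)]
    rfl

theorem pvBounds_big (L : Int) (h : 11 ≤ L) : pvBounds.get? L = none := by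
  have he : pvBounds = PySem.Dict.mk [(1, ((1:Int), (3:Int))), (2, (4, 9)), (3, (10, 31)),
      (4, (32, 99)), (5, (100, 316)), (6, (317, 999)), (7, (1000, 3162)), (8, (3163, 9999)),
      (9, (10000, 31622)), (10, (31623, 99999))] := by decide
  rw [he]
  simp only [PySem.Dict.get?_mk_cons, beq_iff_eq]
  rw [if_neg (by omega), if_neg (by omega), if_neg (by omega), if_neg (by omega),
      if_neg (by omega), if_neg (by omega), if_neg (by omega), if_neg (by omega),
      if_neg (by omega), if_neg (by omega)]
  rfl

-- squares of i ∈ [1,99999] have at most 10 digits: the whole scan is a no-op for long s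
theorem pv_long (L : Int) (ls : List Int) (h : 11 ≤ L) :
    pvALoop L ls (PySem.List.pyRange 1 100000 1) (-1) = -1 := by
  have := pvALoop_skip L ls (PySem.List.pyRange 1 100000 1) [] (-1) (fun i hi => by
    rw [PySem.List.mem_pyRange_one] at hi
    have := pv_len_sq_le i 10 hi.1 (by norm_num; nlinarith [hi.1, hi.2])
    push_cast at this
    omega)
  rw [List.append_nil] at this
  rw [this]
  rfl

theorem pv_case (ls : List Int) (L : Nat) (lo hi : Int)
    (h1 : 1 ≤ lo) (h2 : lo ≤ hi) (h3 : hi ≤ 99999) (hL : 1 ≤ L)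
    (hlo2 : (10:Int) ^ (L - 1) ≤ lo * lo) (hlo1 : (lo - 1) * (lo - 1) < 10 ^ (L - 1))
    (hhi2 : hi * hi < (10:Int) ^ L) (hhi1 : (10:Int) ^ L ≤ (hi + 1) * (hi + 1)) :
    pvALoop (L : Int) ls (PySem.List.pyRange 1 100000 1) (-1) =
      pvBLoop ls (PySem.List.pyRange hi (lo - 1) (-1)) := by
  apply pv_core ls (L : Int) lo hi h1 h2 h3
  · intro i hi1 hi2
    have := pv_len_sq_le i (L - 1) hi1 (by rw [sq]; nlinarith)
    push_cast [Nat.cast_sub hL] at this ⊢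
    omega
  · intro i hi1 hi2
    have := pv_len_sq_eq i (L - 1) (by omega) (by rw [sq]; nlinarith)
      (by rw [sq, show L - 1 + 1 = L from by omega]; nlinarith)
    push_cast [Nat.cast_sub hL] at this ⊢
    omega
  · intro i hi1 hi2
    have := pv_len_sq_gt i L (by omega) (by rw [sq]; nlinarith)
    omega

-- ===== VERDICT (by name: the statement is the Claim_ definition above) =====
theorem solution_spec : Claim_equal_solution := by
  intro s _
  unfold Spec_solution solution solution_alt
  rw [PySem.Str.len_eq]
  generalize pvParse s = ls
  generalize s.toList.length = n
  by_cases hn : n ≤ 10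
  · interval_cases n
    · -- L = 0: first square already has 1 > 0 digits
      rw [show ((0:Nat):Int) = 0 from rfl,
          PySem.List.pyRange_one_cons (by norm_num),
          pvALoop_stop _ _ _ _ _ (by decide)]
      rfl
    · exact pv_case ls 1 1 3 (by norm_num) (by norm_num) (by norm_num) (by norm_num)
        (by norm_num) (by norm_num) (by norm_num) (by norm_num)
    · exact pv_case ls 2 4 9 (by norm_num) (by norm_num) (by norm_num) (by norm_num)
        (by norm_num) (by norm_num) (by norm_num) (by norm_num)
    · exact pv_case ls 3 10 31 (by norm_num) (by norm_num) (by norm_num) (by norm_num)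
        (by norm_num) (by norm_num) (by norm_num) (by norm_num)
    · exact pv_case ls 4 32 99 (by norm_num) (by norm_num) (by norm_num) (by norm_num)
        (by norm_num) (by norm_num) (by norm_num) (by norm_num)
    · exact pv_case ls 5 100 316 (by norm_num) (by norm_num) (by norm_num) (by norm_num)
        (by norm_num) (by norm_num) (by norm_num) (by norm_num)
    · exact pv_case ls 6 317 999 (by norm_num) (by norm_num) (by norm_num) (by norm_num)
        (by norm_num) (by norm_num) (by norm_num) (by norm_num)
    · exact pv_case ls 7 1000 3162 (by norm_num) (by norm_num) (by norm_num) (by norm_num)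
        (by norm_num) (by norm_num) (by norm_num) (by norm_num)
    · exact pv_case ls 8 3163 9999 (by norm_num) (by norm_num) (by norm_num) (by norm_num)
        (by norm_num) (by norm_num) (by norm_num) (by norm_num)
    · exact pv_case ls 9 10000 31622 (by norm_num) (by norm_num) (by norm_num) (by norm_num)
        (by norm_num) (by norm_num) (by norm_num) (by norm_num)
    · exact pv_case ls 10 31623 99999 (by norm_num) (by norm_num) (by norm_num) (by norm_num)
        (by norm_num) (by norm_num) (by norm_num) (by norm_num)
  · rw [pvBounds_big (n : Int) (by omega), pv_long (n : Int) ls (by omega)]
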